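-- pv_equiv track=rewrite | github.com/10Nico17/Motion-Planning | Assignment4_SVM_Bezier_Curves_Differential_Flatness/opt_safe.py | find_closest_neighbors
-- ===== SOURCE A (Python) =====
-- def find_closest_neighbors(segment_point, point_list, coord_index):
--     fixed_coord = segment_point[coord_index]
--     variable_coord = segment_point[1 - coord_index]
--
--     left_neighbor = None
--     right_neighbor = None
--     min_left_diff = float('inf')
--     min_right_diff = float('inf')
--
--     for point in point_list:
--         fixed, variable = point[coord_index], point[1 - coord_index]
--         if variable == variable_coord:
--             diff = fixed_coord - fixed
--             if diff > 0 and diff < min_left_diff: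
--                 min_left_diff = diff
--                 left_neighbor = point
--             elif diff < 0 and -diff < min_right_diff:
--                 min_right_diff = -diff
--                 right_neighbor = point
--
--     return left_neighbor, right_neighbor
-- ===== SOURCE B (Python) =====
-- def find_closest_neighbors(segment_point, point_list, coord_index):
--     fixed_coord = segment_point[coord_index]
--     variable_coord = segment_point[1 - coord_index]
--     candidates = [p for p in point_list if p[1 - coord_index] == variable_coord]
--     left_neighbor = max((p for p in candidates if p[coord_index] < fixed_coord),
--                         key=lambda p: p[coord_index], default=None)
--     right_neighbor = min((p for p in candidates if p[coord_index] > fixed_coord),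
--                          key=lambda p: p[coord_index], default=None)
--     return left_neighbor, right_neighbor
-- ===== Notes on version B (the rewrite author's own statement) =====
-- stated objective: alternative
-- what changed: Replaced A's single fused loop tracking two running minimal differences with a candidate filter (points sharing the variable coordinate) followed by two independent first-wins max/min reductions over the candidates below/above the fixed coordinate.
import Mathlib
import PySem

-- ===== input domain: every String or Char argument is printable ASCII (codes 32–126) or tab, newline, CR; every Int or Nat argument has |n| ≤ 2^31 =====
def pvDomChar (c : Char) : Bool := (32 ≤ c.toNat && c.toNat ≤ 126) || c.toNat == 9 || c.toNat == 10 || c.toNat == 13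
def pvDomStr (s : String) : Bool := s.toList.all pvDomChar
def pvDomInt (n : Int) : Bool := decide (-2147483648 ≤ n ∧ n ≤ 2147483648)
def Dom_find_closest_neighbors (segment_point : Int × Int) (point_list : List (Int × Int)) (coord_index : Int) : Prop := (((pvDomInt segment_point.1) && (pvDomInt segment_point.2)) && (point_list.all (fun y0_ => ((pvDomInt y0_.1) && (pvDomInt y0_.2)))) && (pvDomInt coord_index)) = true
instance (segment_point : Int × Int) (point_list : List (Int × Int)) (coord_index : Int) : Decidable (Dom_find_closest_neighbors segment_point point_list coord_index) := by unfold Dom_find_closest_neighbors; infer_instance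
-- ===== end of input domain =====

-- B replaces A's single fused min-tracking loop by a candidate filter plus two independent
-- first-wins max/min reductions (objective: alternative decomposition, same cost).

-- ===== PORT A =====
-- Python tuple indexing t[i] on a pair: 0/-2 → first, 1/-1 → second, otherwise IndexError (none).
def pvTGet? (p : Int × Int) (i : Int) : Option Int :=
  if i = 0 ∨ i = -2 then some p.1 else if i = 1 ∨ i = -1 then some p.2 else none

-- point[i]; exact whenever the enclosing branch has established that index i is in range for a pair.
def pvKey (i : Int) (p : Int × Int) : Int := (pvTGet? p i).getD 0

-- 'd < m' where m : Option Int, none standing for float('inf').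
def pvLtInf (d : Int) (o : Option Int) : Bool :=
  match o with | none => true | some m => decide (d < m)

-- the body of A's for-loop; state = (left_neighbor, right_neighbor, min_left_diff, min_right_diff)
def pvStepA (fc vc ci : Int)
    (s : Option (Int × Int) × Option (Int × Int) × Option Int × Option Int)
    (point : Int × Int) :
    Option (Int × Int) × Option (Int × Int) × Option Int × Option Int :=
  let fixed := pvKey ci point
  let variable_ := pvKey (1 - ci) point
  if variable_ = vc then
    let diff := fc - fixed
    if 0 < diff ∧ pvLtInf diff s.2.2.1 = true then
      (some point, s.2.1, some diff, s.2.2.2)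
    else if diff < 0 ∧ pvLtInf (-diff) s.2.2.2 = true then
      (s.1, some point, s.2.2.1, some (-diff))
    else s
  else s

def find_closest_neighbors (segment_point : Int × Int) (point_list : List (Int × Int)) (coord_index : Int) : (Option (Int × Int)) × (Option (Int × Int)) :=
  match pvTGet? segment_point coord_index, pvTGet? segment_point (1 - coord_index) with
  | some fixed_coord, some variable_coord =>
    let s := point_list.foldl (pvStepA fixed_coord variable_coord coord_index) (none, none, none, none)
    (s.1, s.2.1)
  | _, _ => (none, none)   -- Python raises IndexError here; excluded by Pre_

-- ===== PORT B =====
-- B-side copy of pair indexing (t[i]: 0/-2 first, 1/-1 second, else IndexError).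
def pvTGetB? (p : Int × Int) (i : Int) : Option Int :=
  if i = 0 ∨ i = -2 then some p.1 else if i = 1 ∨ i = -1 then some p.2 else none

def pvKeyB (i : Int) (p : Int × Int) : Int := (pvTGetB? p i).getD 0

-- max(gen, key=key, default=None): first element with maximal key (strict < to replace).
def pvMaxBy (key : (Int × Int) → Int) (xs : List (Int × Int)) : Option (Int × Int) :=
  xs.foldl (fun acc p =>
    match acc with
    | none => some p
    | some q => if key q < key p then some p else some q) none

-- min(gen, key=key, default=None): first element with minimal key.
def pvMinBy (key : (Int × Int) → Int) (xs : List (Int × Int)) : Option (Int × Int) :=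
  xs.foldl (fun acc p =>
    match acc with
    | none => some p
    | some q => if key p < key q then some p else some q) none

def find_closest_neighbors_alt (segment_point : Int × Int) (point_list : List (Int × Int)) (coord_index : Int) : (Option (Int × Int)) × (Option (Int × Int)) :=
  match pvTGetB? segment_point coord_index with
  | none => (none, none)   -- Python raises IndexError here; excluded by Pre_
  | some fixed_coord =>
    match pvTGetB? segment_point (1 - coord_index) with
    | none => (none, none)   -- IndexError, excluded by Pre_
    | some variable_coord =>
      let candidates := point_list.filter (fun p => pvKeyB (1 - coord_index) p == variable_coord)
      (pvMaxBy (pvKeyB coord_index) (candidates.filter (fun p => decide (pvKeyB coord_index p < fixed_coord))),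
       pvMinBy (pvKeyB coord_index) (candidates.filter (fun p => decide (fixed_coord < pvKeyB coord_index p))))

-- ===== PRECONDITION & SPEC =====
-- A raises IndexError unless both indexing operations are in range for a pair,
-- i.e. coord_index ∈ {0, 1}; Pre_ admits exactly the inputs A returns on.
def Pre_find_closest_neighbors (segment_point : Int × Int) (point_list : List (Int × Int)) (coord_index : Int) : Prop :=
  coord_index = 0 ∨ coord_index = 1
instance (segment_point : Int × Int) (point_list : List (Int × Int)) (coord_index : Int) : Decidable (Pre_find_closest_neighbors segment_point point_list coord_index) := by unfold Pre_find_closest_neighbors; infer_instance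

def pvWitness_find_closest_neighbors : (Int × Int) × (List (Int × Int)) × Int :=
  ((1, 2), [(0, 2), (3, 2), (5, 1)], 0)

def Spec_find_closest_neighbors (segment_point : Int × Int) (point_list : List (Int × Int)) (coord_index : Int) (out : (Option (Int × Int)) × (Option (Int × Int))) : Prop := out = find_closest_neighbors_alt segment_point point_list coord_index
instance (segment_point : Int × Int) (point_list : List (Int × Int)) (coord_index : Int) (out : (Option (Int × Int)) × (Option (Int × Int))) : Decidable (Spec_find_closest_neighbors segment_point point_list coord_index out) := by unfold Spec_find_closest_neighbors; infer_instance

-- ===== CLAIM (what is proved, stated in full; the proofs are below) =====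
def Claim_equal_find_closest_neighbors : Prop := ∀ (segment_point : Int × Int) (point_list : List (Int × Int)) (coord_index : Int), Dom_find_closest_neighbors segment_point point_list coord_index → Pre_find_closest_neighbors segment_point point_list coord_index → Spec_find_closest_neighbors segment_point point_list coord_index (find_closest_neighbors segment_point point_list coord_index)

-- ===== LEMMAS AND PROOFS =====

-- B's two reductions, with both filters fused into the fold step.
def pvMStep (fc vc ci : Int) (acc : Option (Int × Int)) (p : Int × Int) : Option (Int × Int) :=
  if decide (pvKey ci p < fc) && pvKey (1 - ci) p == vc then
    match acc with
    | none => some p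
    | some q => if pvKey ci q < pvKey ci p then some p else some q
  else acc

def pvNStep (fc vc ci : Int) (acc : Option (Int × Int)) (p : Int × Int) : Option (Int × Int) :=
  if decide (fc < pvKey ci p) && pvKey (1 - ci) p == vc then
    match acc with
    | none => some p
    | some q => if pvKey ci p < pvKey ci q then some p else some q
  else acc

theorem keyB_eq_key (i : Int) (p : Int × Int) : pvKeyB i p = pvKey i p := rfl

theorem alt_eq_folds (fc vc ci : Int) (pl : List (Int × Int)) :
    (pvMaxBy (pvKeyB ci) ((pl.filter (fun p => pvKeyB (1 - ci) p == vc)).filter (fun p => decide (pvKeyB ci p < fc))),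
     pvMinBy (pvKeyB ci) ((pl.filter (fun p => pvKeyB (1 - ci) p == vc)).filter (fun p => decide (fc < pvKeyB ci p))))
    = (pl.foldl (pvMStep fc vc ci) none, pl.foldl (pvNStep fc vc ci) none) := by
  simp only [keyB_eq_key]
  unfold pvMaxBy pvMinBy
  rw [List.filter_filter, List.filter_filter]
  rw [← PySem.List.foldl_if_eq_foldl_filter, ← PySem.List.foldl_if_eq_foldl_filter]
  unfold pvMStep pvNStep
  rfl

-- one step of A's loop simulates one step of each of B's reductions, the Option diffs
-- tracking 'fixed_coord - key' / 'key - fixed_coord' of the current extremal point.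
theorem step_sim (fc vc ci : Int) (l r : Option (Int × Int)) (x : Int × Int) :
    pvStepA fc vc ci (l, r, l.map (fun p => fc - pvKey ci p), r.map (fun p => pvKey ci p - fc)) x
    = (pvMStep fc vc ci l x, pvNStep fc vc ci r x,
       (pvMStep fc vc ci l x).map (fun p => fc - pvKey ci p),
       (pvNStep fc vc ci r x).map (fun p => pvKey ci p - fc)) := by
  simp only [pvStepA, pvMStep, pvNStep, pvLtInf]
  cases l <;> cases r <;>
    simp only [Option.map_none, Option.map_some] <;>
    split_ifs <;> simp_all <;> omega

theorem loop_sim (fc vc ci : Int) (pl : List (Int × Int)) :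
    ∀ (l r : Option (Int × Int)),
      pl.foldl (pvStepA fc vc ci) (l, r, l.map (fun p => fc - pvKey ci p), r.map (fun p => pvKey ci p - fc))
      = (pl.foldl (pvMStep fc vc ci) l, pl.foldl (pvNStep fc vc ci) r,
         (pl.foldl (pvMStep fc vc ci) l).map (fun p => fc - pvKey ci p),
         (pl.foldl (pvNStep fc vc ci) r).map (fun p => pvKey ci p - fc)) := by
  induction pl with
  | nil => intro l r; rfl
  | cons x xs ih =>
    intro l r
    simp only [List.foldl_cons, step_sim, ih]

-- ===== VERDICT (by name: the statement is the Claim_ definition above) =====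
theorem find_closest_neighbors_spec : Claim_equal_find_closest_neighbors := by
  intro sp pl ci _ hpre
  unfold Spec_find_closest_neighbors find_closest_neighbors find_closest_neighbors_alt
  have hci : pvTGet? sp ci = some (pvKey ci sp) ∧ pvTGet? sp (1 - ci) = some (pvKey (1 - ci) sp) := by
    rcases hpre with h | h <;> subst h <;> simp [pvTGet?, pvKey]
  have hciB : pvTGetB? sp ci = some (pvKey ci sp) ∧ pvTGetB? sp (1 - ci) = some (pvKey (1 - ci) sp) := by
    rcases hpre with h | h <;> subst h <;> simp [pvTGetB?, pvKey, pvTGet?]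
  rw [hci.1, hci.2, hciB.1, hciB.2]
  simp only []
  rw [alt_eq_folds]
  have := loop_sim (pvKey ci sp) (pvKey (1 - ci) sp) ci pl none none
  simp only [Option.map_none] at this
  rw [this]
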